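-- pv_equiv track=rewrite | github.com/BJTerry/BoardGameBench | bgbench/games/scrabble_game.py | _get_all_words_on_board
-- ===== SOURCE A (Python) =====
-- from typing import List, Dict, Tuple, Optional, Any
--
-- def _get_all_words_on_board(board: List[List[str]]) -> List[Tuple[int, int, str, str]]:
--     words = []
--     size = len(board)
--
--     # Horizontal words
--     for row in range(size):
--         col = 0
--         while col < size:
--             if board[row][col] != '':
--                 start_col = col
--                 word_letters = board[row][col]
--                 col += 1
--                 while col < size and board[row][col] != '':
--                     word_letters += board[row][col]
--                     col += 1
--                 run_length = len(word_letters)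
--                 if run_length >= 2:
--                     words.append((row, start_col, 'horizontal', word_letters))
--             else:
--                 col += 1
--
--     # Vertical words
--     for col in range(size):
--         row = 0
--         while row < size:
--             if board[row][col] != '':
--                 start_row = row
--                 word_letters = board[row][col]
--                 row += 1
--                 while row < size and board[row][col] != '':
--                     word_letters += board[row][col]
--                     row += 1
--                 run_length = len(word_letters)
--                 if run_length >= 2:
--                     words.append((start_row, col, 'vertical', word_letters))
--             else:
--                 row += 1
--     return words
-- ===== SOURCE B (Python) =====
-- def _line_runs(line, offset=0):
--     """(start, word) for each maximal run of non-empty cells whose joined text has length >= 2."""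
--     if '' in line:
--         k = line.index('')
--         head = ''.join(line[:k])
--         rest = _line_runs(line[k + 1:], offset + k + 1)
--         return ([(offset, head)] if len(head) >= 2 else []) + rest
--     w = ''.join(line)
--     return [(offset, w)] if len(w) >= 2 else []
--
-- def _get_all_words_on_board(board):
--     size = len(board)
--     words = []
--     for row in range(size):
--         words += [(row, c, 'horizontal', w) for c, w in _line_runs(board[row][:size])]
--     for col in range(size):
--         column = [board[row][col] for row in range(size)]
--         words += [(r, col, 'vertical', w) for r, w in _line_runs(column)]
--     return words
-- ===== Notes on version B (the rewrite author's own statement) =====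
-- stated objective: alternative
-- what changed: B replaces A's nested index-walking while-loops with a recursive line helper that splits each line at the first empty cell (list.index) and joins the slice before it, applied to row slices and explicitly built columns.
import Mathlib
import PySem

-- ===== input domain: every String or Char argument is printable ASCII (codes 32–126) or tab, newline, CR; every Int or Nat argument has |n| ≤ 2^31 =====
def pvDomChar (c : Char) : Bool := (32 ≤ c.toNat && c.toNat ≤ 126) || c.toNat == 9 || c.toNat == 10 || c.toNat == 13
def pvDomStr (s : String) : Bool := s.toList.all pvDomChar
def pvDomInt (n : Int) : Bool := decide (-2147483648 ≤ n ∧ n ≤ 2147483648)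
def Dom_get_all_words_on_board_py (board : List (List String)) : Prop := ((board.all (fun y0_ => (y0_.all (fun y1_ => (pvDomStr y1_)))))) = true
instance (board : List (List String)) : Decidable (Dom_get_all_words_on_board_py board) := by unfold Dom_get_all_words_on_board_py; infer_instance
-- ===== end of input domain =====

-- B re-implements A's nested index-walking while-loops by recursively splitting each
-- line at the first empty cell (list.index) and joining the slice before it; same
-- return value (return-value equivalence; neither program mutates its argument).

-- ===== PORT A =====
-- board[r][c]; default "" is only read out of range, which Pre_ excludes
def pvCellA (board : List (List String)) (r c : Nat) : String :=
  (board.getD r []).getD c ""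

-- inner 'while col < size and board[row][col] != '':' accumulating word_letters
def runA (g : Nat → String) (n : Nat) (col : Nat) (acc : String) : String × Nat :=
  if _h : col < n ∧ ¬ g col = "" then runA g n (col + 1) (acc ++ g col) else (acc, col)
termination_by n - col
decreasing_by omega

-- the port needs this bound for termination of the outer loop below
theorem runA_snd_le (g : Nat → String) (n : Nat) :
    ∀ fuel col acc, n - col ≤ fuel → col ≤ (runA g n col acc).2 := by
  intro fuel
  induction fuel with
  | zero =>
    intro col acc h
    rw [runA]
    split
    · omega
    · simp
  | succ m ih =>
    intro col acc h
    rw [runA]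
    split
    · rename_i hc
      have := ih (col + 1) (acc ++ g col) (by omega)
      omega
    · simp

-- outer 'while col < size:' of one line (start index, word) pairs, in scan order
def scanA (g : Nat → String) (n : Nat) (col : Nat) : List (Nat × String) :=
  if hcol : col < n then
    if hc : ¬ g col = "" then
      let p := runA g n (col + 1) (g col)
      (if (2 : Int) ≤ PySem.Str.len p.1 then [(col, p.1)] else []) ++ scanA g n p.2
    else scanA g n (col + 1)
  else []
termination_by n - col
decreasing_by
  · have := runA_snd_le g n (n - col - 1) (col + 1) (g col) (by omega)
    omega
  · omega

def get_all_words_on_board_py (board : List (List String)) : List (Int × Int × String × String) :=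
  let size := board.length
  ((List.range size).flatMap (fun row =>
      (scanA (fun c => pvCellA board row c) size 0).map
        (fun p => ((row : Int), ((p.1 : Int), ("horizontal", p.2))))))
  ++ ((List.range size).flatMap (fun col =>
      (scanA (fun r => pvCellA board r col) size 0).map
        (fun p => (((p.1 : Int), ((col : Int), ("vertical", p.2)))))))

-- ===== PORT B =====
-- Source B's _line_runs: split at the first '' (list.index); line[:k] = take k, line[k+1:] = drop (k+1)
def lineRuns (line : List String) (offset : Nat) : List (Nat × String) :=
  match hk : PySem.List.index? line "" with
  | some k =>
      let head := PySem.Str.join "" (line.take k)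
      let rest := lineRuns (line.drop (k + 1)) (offset + k + 1)
      (if (2 : Int) ≤ PySem.Str.len head then [(offset, head)] else []) ++ rest
  | none =>
      let w := PySem.Str.join "" line
      if (2 : Int) ≤ PySem.Str.len w then [(offset, w)] else []
termination_by line.length
decreasing_by
  have hmem : ("" : String) ∈ line :=
    (PySem.List.index?_isSome_iff line "").mp (by rw [hk]; rfl)
  have : line ≠ [] := by intro h; rw [h] at hmem; simp at hmem
  cases line with
  | nil => simp at this
  | cons a l => simp

def get_all_words_on_board_py_alt (board : List (List String)) : List (Int × Int × String × String) :=
  let size := board.length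
  ((List.range size).flatMap (fun row =>
      (lineRuns ((board.getD row []).take size) 0).map
        (fun p => ((row : Int), ((p.1 : Int), ("horizontal", p.2))))))
  ++ ((List.range size).flatMap (fun col =>
      (lineRuns ((List.range size).map (fun row => (board.getD row []).getD col "")) 0).map
        (fun p => (((p.1 : Int), ((col : Int), ("vertical", p.2)))))))

-- ===== PRECONDITION & SPEC =====
-- Pre_ excludes exactly the boards where some row is shorter than the board: there A raises IndexError.
def Pre_get_all_words_on_board_py (board : List (List String)) : Prop :=
  ∀ row ∈ board, board.length ≤ row.length
instance (board : List (List String)) : Decidable (Pre_get_all_words_on_board_py board) := by unfold Pre_get_all_words_on_board_py; infer_instance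

def pvWitness_get_all_words_on_board_py : List (List String) := [["A", "B"], ["C", ""]]

def Spec_get_all_words_on_board_py (board : List (List String)) (out : List (Int × Int × String × String)) : Prop := out = get_all_words_on_board_py_alt board
instance (board : List (List String)) (out : List (Int × Int × String × String)) : Decidable (Spec_get_all_words_on_board_py board out) := by unfold Spec_get_all_words_on_board_py; infer_instance

-- ===== CLAIM (what is proved, stated in full; the proofs are below) =====
def Claim_equal_get_all_words_on_board_py : Prop := ∀ (board : List (List String)), Dom_get_all_words_on_board_py board → Pre_get_all_words_on_board_py board → Spec_get_all_words_on_board_py board (get_all_words_on_board_py board)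

-- ===== LEMMAS AND PROOFS =====

theorem intercalate_nil_flatten (xs : List (List Char)) : [].intercalate xs = xs.flatten := by
  induction xs with
  | nil => simp [List.intercalate]
  | cons h t ih => cases t <;> simp_all [List.intercalate, List.intersperse]
theorem joinE_nil : PySem.Str.join "" ([] : List String) = "" := by decide
theorem joinE_cons (x : String) (xs : List String) :
    PySem.Str.join "" (x :: xs) = x ++ PySem.Str.join "" xs := by
  simp [PySem.Str.join, PySem.Chars.join, intercalate_nil_flatten, String.ofList_append]

theorem index?_empty_some (line : List String) (k : Nat)
    (hk : PySem.List.index? line "" = some k) :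
    k = (line.takeWhile (fun s => s != "")).length ∧
    line.take k = line.takeWhile (fun s => s != "") ∧ k < line.length := by
  induction line generalizing k with
  | nil => simp [PySem.List.index?] at hk
  | cons x xs ih =>
    by_cases hx : x = ""
    · subst hx
      rw [PySem.List.index?_cons_self] at hk
      cases hk
      simp
    · rw [PySem.List.index?_cons_of_ne xs hx] at hk
      cases hj : PySem.List.index? xs "" with
      | none => rw [hj] at hk; simp at hk
      | some j =>
        rw [hj] at hk
        simp at hk
        obtain ⟨h1, h2, h3⟩ := ih j hj
        subst hk
        refine ⟨by simp [hx, h1], by simp [hx, h2], by simpa using h3⟩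

theorem index?_empty_none (line : List String)
    (hk : PySem.List.index? line "" = none) :
    line.takeWhile (fun s => s != "") = line := by
  have : ("" : String) ∉ line := (PySem.List.index?_eq_none_iff line "").mp hk
  apply List.takeWhile_eq_self_iff.mpr
  intro x hx
  simp
  intro h; subst h; exact this hx

theorem runA_spec (g : Nat → String) (n : Nat) :
    ∀ fuel col acc, n - col ≤ fuel →
      runA g n col acc =
        (acc ++ PySem.Str.join "" (((List.range' col (n - col)).map g).takeWhile (fun s => s != "")),
         col + (((List.range' col (n - col)).map g).takeWhile (fun s => s != "")).length) := by
  intro fuel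
  induction fuel with
  | zero =>
    intro col acc h
    have h0 : n - col = 0 := by omega
    rw [runA]
    have : ¬ (col < n ∧ ¬ g col = "") := by omega
    simp [this, h0, joinE_nil]
  | succ m ih =>
    intro col acc h
    by_cases hcol : col < n
    · have hsplit : List.range' col (n - col) = col :: List.range' (col + 1) (n - (col + 1)) := by
        rw [show n - col = (n - (col + 1)) + 1 by omega, List.range'_succ]
      by_cases hc : g col = ""
      · rw [runA]
        have : ¬ (col < n ∧ ¬ g col = "") := by simp [hc]
        simp [hsplit, hc, joinE_nil]
      · rw [runA]
        simp only [hcol, hc, not_false_iff, and_self, dif_pos]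
        rw [ih (col + 1) (acc ++ g col) (by omega)]
        simp [hsplit, hc, joinE_cons, String.append_assoc]
        omega
    · have h0 : n - col = 0 := by omega
      rw [runA]
      have : ¬ (col < n ∧ ¬ g col = "") := by omega
      simp [this, h0, joinE_nil]

theorem lineRuns_nil (o : Nat) : lineRuns [] o = [] := by
  rw [lineRuns]
  split
  · rename_i k hk; rw [PySem.List.index?_eq_idxOf?] at hk; simp at hk
  · simp [joinE_nil]

theorem lineRuns_eq_some (line : List String) (o k : Nat)
    (hk : PySem.List.index? line "" = some k) :
    lineRuns line o =
      (if (2 : Int) ≤ PySem.Str.len (PySem.Str.join "" (line.take k))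
        then [(o, PySem.Str.join "" (line.take k))] else [])
      ++ lineRuns (line.drop (k + 1)) (o + k + 1) := by
  rw [lineRuns]
  split
  · rename_i k' hk'
    rw [hk] at hk'
    cases hk'
    rfl
  · rename_i hk'
    rw [hk] at hk'
    cases hk'

theorem lineRuns_eq_none (line : List String) (o : Nat)
    (hk : PySem.List.index? line "" = none) :
    lineRuns line o =
      (if (2 : Int) ≤ PySem.Str.len (PySem.Str.join "" line)
        then [(o, PySem.Str.join "" line)] else []) := by
  rw [lineRuns]
  split
  · rename_i k' hk'
    rw [hk] at hk'
    cases hk'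
  · rfl

theorem scan_eq (g : Nat → String) (n : Nat) :
    ∀ fuel col, n - col ≤ fuel →
      scanA g n col = lineRuns ((List.range' col (n - col)).map g) col := by
  intro fuel
  induction fuel with
  | zero =>
    intro col h
    have h0 : n - col = 0 := by omega
    rw [scanA]
    simp [show ¬ col < n by omega, h0, lineRuns_nil]
  | succ m ih =>
    intro col h
    by_cases hcol : col < n
    · have hsplit : List.range' col (n - col) = col :: List.range' (col + 1) (n - (col + 1)) := by
        rw [show n - col = (n - (col + 1)) + 1 by omega, List.range'_succ]
      set L : List String := (List.range' col (n - col)).map g with hL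
      have hLcons : L = g col :: (List.range' (col + 1) (n - (col + 1))).map g := by
        rw [hL, hsplit]; simp
      by_cases hc : g col = ""
      · -- empty first cell: both step to col+1
        rw [scanA]
        simp only [hcol, dif_pos, hc, not_true_eq_false, dif_neg, not_false_eq_true]
        rw [ih (col + 1) (by omega), hLcons, hc]
        rw [lineRuns_eq_some ("" :: List.map g (List.range' (col + 1) (n - (col + 1)))) col 0
              (PySem.List.index?_cons_self "" _)]
        simp [joinE_nil]
      · -- nonempty first cell
        have hrun := runA_spec g n (n - (col + 1)) (col + 1) (g col) (le_refl _)
        set T1 : List String := ((List.range' (col + 1) (n - (col + 1))).map g).takeWhile (fun s => s != "") with hT1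
        have hTake : L.takeWhile (fun s => s != "") = g col :: T1 := by
          rw [hLcons]
          simp [hc]
          exact hT1.symm
        have hLlen : L.length = n - col := by simp [hL]
        rw [scanA]
        simp only [hcol, dif_pos, hc, not_false_eq_true, hrun]
        cases hidx : PySem.List.index? L "" with
        | some k =>
          obtain ⟨hk1, hk2, hk3⟩ := index?_empty_some L k hidx
          have hkT : k = T1.length + 1 := by rw [hk1, hTake]; simp
          obtain ⟨hklen, hLk, -⟩ := PySem.List.getElem_of_index?_eq_some hidx
          have hgk : g (col + k) = "" := by
            have hgetm : L[k]'hklen = g (col + k) := by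
              simp [hL, List.getElem_map, List.getElem_range']
            rw [← hgetm, hLk]
          have hkn : col + k < n := by omega
          have htail : scanA g n (col + 1 + T1.length) = lineRuns (L.drop (k + 1)) (col + k + 1) := by
            have hck : col + 1 + T1.length = col + k := by omega
            rw [hck, scanA]
            simp only [hkn, dif_pos, hgk, not_true_eq_false, dif_neg, not_false_eq_true]
            rw [ih (col + k + 1) (by omega)]
            have hdrop : L.drop (k + 1) = List.map g (List.range' (col + k + 1) (n - (col + k + 1))) := by
              rw [hL, ← List.map_drop, List.drop_range']
              congr 2
              all_goals omega
            rw [hdrop]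
          rw [lineRuns_eq_some L col k hidx, htail]
          congr 2 <;> rw [hk2, hTake, joinE_cons]
        | none =>
          have hTL : L.takeWhile (fun s => s != "") = L := index?_empty_none L hidx
          have hT1len : T1.length + 1 = n - col := by
            have hlen := congrArg List.length hTL
            rw [hTake] at hlen
            simp only [List.length_cons, hLlen] at hlen
            omega
          have hjoin : g col ++ PySem.Str.join "" T1 = PySem.Str.join "" L := by
            rw [← joinE_cons, ← hTake, hTL]
          have hend : scanA g n (col + 1 + T1.length) = [] := by
            rw [scanA]
            simp [show ¬ (col + 1 + T1.length < n) by omega]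
          rw [lineRuns_eq_none L col hidx, hend, hjoin]
          simp
    · have h0 : n - col = 0 := by omega
      rw [scanA]
      simp [show ¬ col < n by omega, h0, lineRuns_nil]

theorem range'_map_getD (xs : List String) (n : Nat) (h : n ≤ xs.length) :
    (List.range' 0 n).map (fun i => xs.getD i "") = xs.take n := by
  apply List.ext_getElem
  · simp [h]
  · intro i h1 h2
    simp only [List.getElem_map, List.getElem_range', List.getElem_take]
    have hi : i < n := by simpa using h1
    rw [List.getD_eq_getElem xs "" (by omega)]
    simp

-- ===== VERDICT (by name: the statement is the Claim_ definition above) =====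
theorem get_all_words_on_board_py_spec : Claim_equal_get_all_words_on_board_py := by
  intro board _ hpre
  unfold Pre_get_all_words_on_board_py at hpre
  unfold Spec_get_all_words_on_board_py
  unfold get_all_words_on_board_py get_all_words_on_board_py_alt
  simp only [pvCellA]
  congr 1
  · apply List.flatMap_congr
    intro row hrow
    have hlt : row < board.length := List.mem_range.mp hrow
    congr 1
    rw [scan_eq _ board.length board.length 0 (by omega)]
    congr 1
    have hmem : board.getD row [] ∈ board := by
      rw [List.getD_eq_getElem board [] hlt]
      exact List.getElem_mem hlt
    rw [Nat.sub_zero, range'_map_getD _ _ (hpre _ hmem)]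
  · apply List.flatMap_congr
    intro col hcol
    congr 1
    rw [scan_eq _ board.length board.length 0 (by omega)]
    congr 1
    rw [Nat.sub_zero, List.range_eq_range']
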